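-- pv_equiv track=rewrite | github.com/Aryaman0333/UoA-CSC120 | rhymes.py | check
-- ===== SOURCE A (Python) =====
-- def check(pfile,word):
--     """
--     Checks the rhyming words of 'word' in 'pfile'.
--     Parameters: pfile- It is the dictionary containg all the words
--                        and their pronounciation.
--                 word- It is the word whose rhyming words need to be found.
--     Returns: A list of all the rhyming words.
--     """
--     rhyming=[]
--     phoneme={}
--     #dictionary of the word's principal stress and phonemes
--     #first loop iterates through alternate pronounciations
--     for a in pfile[word]:
--         #iterates through the list containing pronounciation
--         for z in range(len(a)):
--             #finds the primary stress
--             if a[z][-1]=='1':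
--                 if a[z] not in phoneme:
--                     phoneme[a[z]]=[[a[z-1],a[(z+1):]]]
--                 else:
--                     phoneme[a[z]].append([a[z-1],a[(z+1):]])
--    #compares the principal stress and phenomes
--     for i,j in pfile.items():
--         for b in j:
--             #iterates through the list containing pronounciation
--             for x in range(len(b)):
--                 #finds the primary stress and checks all conditions
--                 if b[x][-1]=='1':
--                     if b[x] in phoneme:
--                         for o in phoneme[b[x]]:
--                             if o[0]!=b[x-1] and o[1]==b[(x+1):]:
--                                rhyming.append(i)
--     return rhyming
-- ===== SOURCE B (Python) =====
-- def check(pfile, word):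
--     """Counting reformulation: one pass over the query word's pronunciations builds two
--     counters (total matches per (stress, suffix); same-predecessor matches per
--     (stress, prev, suffix)); the dictionary scan then emits each word i repeated
--     total - same times, with no inner loop over query entries."""
--     total = {}
--     same = {}
--     for a in pfile[word]:
--         for z, ph in enumerate(a):
--             if ph.endswith('1'):
--                 suf = tuple(a[z + 1:])
--                 total[(ph, suf)] = total.get((ph, suf), 0) + 1
--                 same[(ph, a[z - 1], suf)] = same.get((ph, a[z - 1], suf), 0) + 1
--     rhyming = []
--     for i, prons in pfile.items():
--         for b in prons:
--             for x, ph in enumerate(b):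
--                 if ph.endswith('1'):
--                     suf = tuple(b[x + 1:])
--                     n = total.get((ph, suf), 0) - same.get((ph, b[x - 1], suf), 0)
--                     rhyming += [i] * n
--     return rhyming
-- ===== Notes on version B (the rewrite author's own statement) =====
-- stated objective: alternative
-- what changed: B replaces A's stress-keyed table of (prev, suffix) entries and its inner scan comparing suffixes per candidate by a counting reformulation: one pass over the query builds two counters (occurrences per (stress, suffix) and per (stress, prev, suffix)), and the dictionary scan emits each word repeated total-minus-same times via list multiplication, with no inner loop at all.
import Mathlib
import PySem

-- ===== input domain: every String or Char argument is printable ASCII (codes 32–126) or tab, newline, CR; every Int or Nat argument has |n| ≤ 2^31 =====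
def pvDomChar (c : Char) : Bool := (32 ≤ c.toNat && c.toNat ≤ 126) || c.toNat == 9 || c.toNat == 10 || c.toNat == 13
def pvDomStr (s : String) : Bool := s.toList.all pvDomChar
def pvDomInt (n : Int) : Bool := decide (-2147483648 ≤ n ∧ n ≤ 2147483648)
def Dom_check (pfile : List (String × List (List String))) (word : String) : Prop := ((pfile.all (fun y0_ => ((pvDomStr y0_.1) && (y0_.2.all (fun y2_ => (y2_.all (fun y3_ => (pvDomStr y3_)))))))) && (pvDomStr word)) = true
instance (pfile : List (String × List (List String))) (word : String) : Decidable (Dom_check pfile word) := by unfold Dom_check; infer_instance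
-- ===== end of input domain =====

-- B replaces A's stress-keyed table and its inner scan over query entries by a counting
-- reformulation: two counters over the query's stress events (per (stress,suffix) and per
-- (stress,prev,suffix)); the dictionary scan emits each word repeated (total - same) times.
-- Alternative algorithm (arithmetic on counts instead of a filtered inner loop), same cost
-- class; equal output proved on Pre_ (word present, no empty phoneme strings).


-- ===== PORT A =====
-- Python's 2-element value [a[z-1], a[(z+1):]] is ported as the pair (prev, suffix)
-- (exact: it is only built and compared component-wise).
-- inner double loop of A's first phase: one pronunciation's pass over the stress table
def phonemeStep (ph : PySem.Dict String (List (String × List String))) (a : List String) :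
    PySem.Dict String (List (String × List String)) :=
  (PySem.List.pyRange 0 (PySem.List.len a) 1).foldl (fun ph z =>
    if PySem.Str.pyGet? (PySem.List.pyGetD a z "") (-1) == some '1' then
      if ph.contains (PySem.List.pyGetD a z "") = false then
        ph.insert (PySem.List.pyGetD a z "")
          [(PySem.List.pyGetD a (z - 1) "", PySem.List.slice a (some (z + 1)) none)]
      else
        ph.modify (PySem.List.pyGetD a z "") []
          (fun l => l ++ [(PySem.List.pyGetD a (z - 1) "", PySem.List.slice a (some (z + 1)) none)])
    else ph) ph

def check (pfile : List (String × List (List String))) (word : String) : List String :=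
  -- pfile[word]: first-match lookup; KeyError (word absent) is excluded by Pre_check
  let prons := ((PySem.Dict.mk pfile).get? word).getD []
  let phoneme := prons.foldl phonemeStep PySem.Dict.empty
  pfile.foldl (fun rhyming ij =>
    ij.2.foldl (fun rhyming b =>
      (PySem.List.pyRange 0 (PySem.List.len b) 1).foldl (fun rhyming x =>
        -- b[x][-1] == '1'; IndexError on an empty phoneme string is excluded by Pre_check
        if PySem.Str.pyGet? (PySem.List.pyGetD b x "") (-1) == some '1' then
          if phoneme.contains (PySem.List.pyGetD b x "") then
            (phoneme.getD (PySem.List.pyGetD b x "") []).foldl (fun rhyming o =>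
              if o.1 != PySem.List.pyGetD b (x - 1) "" &&
                  o.2 == PySem.List.slice b (some (x + 1)) none then
                rhyming ++ [ij.1]
              else rhyming) rhyming
          else rhyming
        else rhyming) rhyming) rhyming) []

-- ===== PORT B =====
-- one pronunciation's pass updating both counters; d[k] = d.get(k, 0) + 1 is exactly
-- Dict.insert k (d.getD k 0 + 1)
def countStep
    (td : PySem.Dict (String × List String) Int × PySem.Dict (String × String × List String) Int)
    (a : List String) :
    PySem.Dict (String × List String) Int × PySem.Dict (String × String × List String) Int :=
  (PySem.List.enumerate a 0).foldl (fun td p =>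
    if PySem.Str.endswith p.2 "1" then
      let suf := PySem.List.slice a (some (p.1 + 1)) none
      (td.1.insert (p.2, suf) (td.1.getD (p.2, suf) 0 + 1),
       td.2.insert (p.2, PySem.List.pyGetD a (p.1 - 1) "", suf)
         (td.2.getD (p.2, PySem.List.pyGetD a (p.1 - 1) "", suf) 0 + 1))
    else td) td

def check_alt (pfile : List (String × List (List String))) (word : String) : List String :=
  let ts := (((PySem.Dict.mk pfile).get? word).getD []).foldl countStep
    (PySem.Dict.empty, PySem.Dict.empty)
  pfile.foldl (fun rhyming ij =>
    ij.2.foldl (fun rhyming b =>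
      (PySem.List.enumerate b 0).foldl (fun rhyming p =>
        if PySem.Str.endswith p.2 "1" then
          let suf := PySem.List.slice b (some (p.1 + 1)) none
          let n := ts.1.getD (p.2, suf) 0 -
            ts.2.getD (p.2, PySem.List.pyGetD b (p.1 - 1) "", suf) 0
          rhyming ++ PySem.List.pyRepeat [ij.1] n
        else rhyming) rhyming) rhyming) []

-- ===== PRECONDITION & SPEC =====
-- Pre_ excludes exactly the inputs on which Python A raises: KeyError when word is not a key
-- of pfile, and IndexError (s[-1] on an empty phoneme string) when any pronunciation anywhere
-- in pfile contains the empty string.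
def Pre_check (pfile : List (String × List (List String))) (word : String) : Prop :=
  (pfile.any (fun p => p.1 == word)) = true ∧
  (pfile.all (fun p => p.2.all (fun a => a.all (fun s => !(s == ""))))) = true
instance (pfile : List (String × List (List String))) (word : String) : Decidable (Pre_check pfile word) := by unfold Pre_check; infer_instance

def pvWitness_check : (List (String × List (List String))) × String := ([("a", [["AH1"]])], "a")

def Spec_check (pfile : List (String × List (List String))) (word : String) (out : List String) : Prop := out = check_alt pfile word
instance (pfile : List (String × List (List String))) (word : String) (out : List String) : Decidable (Spec_check pfile word out) := by unfold Spec_check; infer_instance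

-- ===== CLAIM (what is proved, stated in full; the proofs are below) =====
def Claim_equal_check : Prop := ∀ (pfile : List (String × List (List String))) (word : String), Dom_check pfile word → Pre_check pfile word → Spec_check pfile word (check pfile word)

-- ===== LEMMAS AND PROOFS =====

-- the stress events (stress, preceding phoneme, suffix) one pronunciation yields, in order
def eventsOf (a : List String) : List (String × String × List String) :=
  ((PySem.List.pyRange 0 (PySem.List.len a) 1).filter
      (fun z => PySem.Str.endswith (PySem.List.pyGetD a z "") "1")).map
    (fun z => (PySem.List.pyGetD a z "", PySem.List.pyGetD a (z - 1) "",
               PySem.List.slice a (some (z + 1)) none))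

-- A's test s[-1] == '1' and B's test s.endswith('1') are the same Bool (both false on "")
theorem last_cond (s : String) :
    (PySem.Str.pyGet? s (-1) == some '1') = PySem.Str.endswith s "1" := by
  rw [Bool.eq_iff_iff]
  simp only [beq_iff_eq, PySem.Str.pyGet?_eq, PySem.Chars.pyGet?_eq_listPyGet?,
    PySem.List.pyGet?_neg_one, PySem.Str.endswith_eq, PySem.Chars.endswith_iff]
  constructor
  · intro h
    obtain ⟨ys, hy⟩ := List.getLast?_eq_some_iff.mp h
    exact ⟨ys, by simp [hy]⟩
  · rintro ⟨ys, hy⟩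
    have : s.toList = ys ++ ['1'] := by simpa using hy.symm
    exact List.getLast?_eq_some_iff.mpr ⟨ys, by simp [this]⟩

-- A's two branches are both Dict.modify (which inserts at the end when the key is fresh)
theorem branch_eq {κ : Type} [BEq κ] [LawfulBEq κ] {β : Type}
    (d : PySem.Dict κ (List β)) (k : κ) (v : β) :
    (if d.contains k = false then d.insert k [v] else d.modify k [] (fun l => l ++ [v]))
      = d.modify k [] (fun l => l ++ [v]) := by
  by_cases h : d.contains k = false
  · simp only [h, if_true, PySem.Dict.modify, PySem.Dict.getD_of_not_contains d [] h,
      List.nil_append]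
  · simp [h]

-- enumerate(a) is range(len(a)) paired with the indexed elements
theorem enum_eq_map {α : Type} (a : List α) (d : α) :
    PySem.List.enumerate a 0 =
      (PySem.List.pyRange 0 (PySem.List.len a) 1).map (fun z => (z, PySem.List.pyGetD a z d)) := by
  induction a using List.reverseRecOn with
  | nil => simp [PySem.List.enumerate_nil, PySem.List.pyRange_one_eq_nil]
  | append_singleton as x ih =>
    rw [PySem.List.enumerate_append, ih, PySem.List.enumerate_cons, PySem.List.enumerate_nil]
    have hL : PySem.List.len as = (as.length : Int) := PySem.List.len_eq as
    have hlen : PySem.List.len (as ++ [x]) = PySem.List.len as + 1 := by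
      simp [PySem.List.len_eq]
    rw [hlen, PySem.List.pyRange_one_succ_right (by rw [hL]; positivity), List.map_append]
    congr 1
    · apply List.map_congr_left
      intro z hz
      rw [PySem.List.mem_pyRange_one, hL] at hz
      have e1 := PySem.List.pyGetD_eq_getElem (as ++ [x]) d hz.1
        (by rw [List.length_append]; push_cast; omega)
      have e2 := PySem.List.pyGetD_eq_getElem as d hz.1 hz.2
      have h3 : z.toNat < as.length := by omega
      rw [e1, e2, List.getElem_append_left h3]
    · rw [hL]
      simp [PySem.List.pyGetD_natCast, List.getD_eq_getElem?_getD]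

theorem phonemeStep_eq (d : PySem.Dict String (List (String × List String))) (a : List String) :
    phonemeStep d a
      = (eventsOf a).foldl (fun d p => d.modify p.1 [] (fun l => l ++ [p.2])) d := by
  unfold phonemeStep eventsOf
  simp only [last_cond, branch_eq]
  rw [PySem.List.foldl_if_eq_foldl_filter, List.foldl_map]

-- A's table, looked up at stress s, is the event stream filtered on s
theorem phoneme_getD (prons : List (List String)) (s : String) :
    (prons.foldl phonemeStep PySem.Dict.empty).getD s []
      = ((prons.flatMap eventsOf).filter (fun e => e.1 == s)).map (fun e => e.2) := by
  have hf : phonemeStep = fun d a =>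
      (eventsOf a).foldl (fun d p => d.modify p.1 [] (fun l => l ++ [p.2])) d :=
    funext₂ phonemeStep_eq
  rw [hf, ← List.foldl_flatMap, PySem.Dict.getD_foldl_modify_append, PySem.Dict.getD_empty,
    List.nil_append]

-- a counting loop keyed through a projection is the Counter of the projected list
theorem foldl_insert_key {κ β : Type} [BEq κ] (l : List β) (key : β → κ) :
    l.foldl (fun d x => d.insert (key x) (d.getD (key x) 0 + 1)) PySem.Dict.empty
      = PySem.Dict.counter (l.map key) := by
  rw [← PySem.Dict.foldl_insert_getD_add_one_eq_counter, List.foldl_map]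

-- B's one-pass pair of counters, as a fold over the event stream
theorem countStep_eq
    (td : PySem.Dict (String × List String) Int × PySem.Dict (String × String × List String) Int)
    (a : List String) :
    countStep td a
      = (eventsOf a).foldl (fun td e =>
          (td.1.insert (e.1, e.2.2) (td.1.getD (e.1, e.2.2) 0 + 1),
           td.2.insert (e.1, e.2.1, e.2.2) (td.2.getD (e.1, e.2.1, e.2.2) 0 + 1))) td := by
  unfold countStep eventsOf
  rw [enum_eq_map a "", List.foldl_map, PySem.List.foldl_if_eq_foldl_filter, List.foldl_map]

-- the two counters are the Counters of the event stream's two key projections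
theorem counters_eq (prons : List (List String)) :
    prons.foldl countStep (PySem.Dict.empty, PySem.Dict.empty)
      = (PySem.Dict.counter ((prons.flatMap eventsOf).map (fun e => (e.1, e.2.2))),
         PySem.Dict.counter ((prons.flatMap eventsOf).map (fun e => (e.1, e.2.1, e.2.2)))) := by
  have hf : countStep = fun td a =>
      (eventsOf a).foldl (fun td e =>
          (td.1.insert (e.1, e.2.2) (td.1.getD (e.1, e.2.2) 0 + 1),
           td.2.insert (e.1, e.2.1, e.2.2) (td.2.getD (e.1, e.2.1, e.2.2) 0 + 1))) td :=
    funext₂ countStep_eq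
  rw [hf, ← List.foldl_flatMap]
  have hp := PySem.List.foldl_prod_mk
    (fun (d : PySem.Dict (String × List String) Int) (e : String × String × List String) =>
      d.insert (e.1, e.2.2) (d.getD (e.1, e.2.2) 0 + 1))
    (fun (d : PySem.Dict (String × String × List String) Int) (e : String × String × List String) =>
      d.insert (e.1, e.2.1, e.2.2) (d.getD (e.1, e.2.1, e.2.2) 0 + 1))
    (prons.flatMap eventsOf) PySem.Dict.empty PySem.Dict.empty
  refine Eq.trans rfl (hp.trans ?_)
  exact congrArg₂ Prod.mk (foldl_insert_key _ _) (foldl_insert_key _ _)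

-- A's `if b[x] in phoneme` guard is redundant for a fold started from the looked-up list
theorem contains_fold_eq {κ ν β : Type} [BEq κ] (d : PySem.Dict κ (List ν)) (k : κ)
    (f : List β → ν → List β) (acc : List β) :
    (if d.contains k then (d.getD k []).foldl f acc else acc) = (d.getD k []).foldl f acc := by
  by_cases h : d.contains k = true
  · simp [h]
  · rw [if_neg (by simp_all), PySem.Dict.getD_of_not_contains d [] (by simp_all)]
    rfl

-- splitting a countP along a second test
theorem countP_split {α : Type} (l : List α) (q r : α → Bool) :
    l.countP q = l.countP (fun x => q x && r x) + l.countP (fun x => q x && !r x) := by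
  induction l with
  | nil => rfl
  | cons a l ih =>
    simp only [List.countP_cons, ih]
    cases hq : q a <;> cases hr : r a <;> simp [hq, hr] <;> try omega

-- the count A's inner scan appends equals total-count minus same-predecessor count
theorem count_arith (E : List (String × String × List String)) (s p : String) (t : List String) :
    (List.count (s, t) (E.map (fun e => (e.1, e.2.2))) : Int) -
        (List.count (s, p, t) (E.map (fun e => (e.1, e.2.1, e.2.2))) : Int)
      = (((E.filter (fun e => e.1 == s)).map (fun e => e.2)).countP
          (fun o => o.1 != p && o.2 == t) : Int) := by
  rw [List.count_eq_countP, List.count_eq_countP, List.countP_map, List.countP_map,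
    List.countP_map, List.countP_filter]
  simp only [Function.comp_def]
  have h1 : List.countP (fun e : String × String × List String => (e.1, e.2.2) == (s, t)) E
      = List.countP (fun e : String × String × List String =>
          (e.1 == s && e.2.2 == t)) E := by
    apply List.countP_congr; intro e _
    simp [Prod.ext_iff]
  have h2 : List.countP (fun e : String × String × List String =>
        (e.1, e.2.1, e.2.2) == (s, p, t)) E
      = List.countP (fun e : String × String × List String =>
          (e.1 == s && e.2.2 == t) && e.2.1 == p) E := by
    apply List.countP_congr; intro e _
    simp [Prod.ext_iff]; tauto
  have h3 : List.countP (fun e : String × String × List String =>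
        (e.2.1 != p && e.2.2 == t) && e.1 == s) E
      = List.countP (fun e : String × String × List String =>
          (e.1 == s && e.2.2 == t) && !(e.2.1 == p)) E := by
    apply List.countP_congr; intro e _
    cases he : e.2.1 == p <;> simp [bne, he] <;> tauto
  rw [h1, h2, h3]
  have := countP_split E
    (fun e : String × String × List String => e.1 == s && e.2.2 == t) (fun e => e.2.1 == p)
  omega

theorem check_eq_alt (pfile : List (String × List (List String))) (word : String) :
    check pfile word = check_alt pfile word := by
  unfold check check_alt
  rw [counters_eq]
  apply PySem.List.foldl_congr_mem
  intro acc ij _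
  apply PySem.List.foldl_congr_mem
  intro rhy b _
  rw [enum_eq_map b "", List.foldl_map]
  apply PySem.List.foldl_congr_mem
  intro r z _
  simp only [last_cond]
  by_cases h : PySem.Str.endswith (PySem.List.pyGetD b z "") "1" = true
  · simp only [h, if_true]
    rw [contains_fold_eq, phoneme_getD, PySem.List.foldl_append_if,
      PySem.Dict.getD_counter, PySem.Dict.getD_counter, PySem.List.pyRepeat_singleton,
      count_arith, Int.toNat_natCast, List.countP_eq_length_filter, ← List.map_const']
  · simp only [h]
    rfl

-- ===== VERDICT (by name: the statement is the Claim_ definition above) =====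
theorem check_spec : Claim_equal_check := by
  intro pfile word _ _
  unfold Spec_check
  exact check_eq_alt pfile word
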